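-- pv_equiv track=rewrite | github.com/venkat-0706/CodeArena-Leetcode | 2137-final-value-of-variable-after-performing-operations/2137-final-value-of-variable-after-performing-operations.py | finalValueAfterOperations
-- ===== SOURCE A (Python) =====
-- from typing import List
--
-- def finalValueAfterOperations(operations: List[str]) -> int:
--     count = 0
--     for num in operations:
--         if "--" in num:
--             count -= 1
--         else:
--             count += 1
--     return count
-- ===== SOURCE B (Python) =====
-- def finalValueAfterOperations(operations):
--     # divide and conquer: value of a list is the sum of the values of its halves
--     if not operations:
--         return 0
--     if len(operations) == 1:
--         return -1 if "--" in operations[0] else 1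
--     mid = len(operations) // 2
--     return finalValueAfterOperations(operations[:mid]) + finalValueAfterOperations(operations[mid:])
-- ===== Notes on version B (the rewrite author's own statement) =====
-- stated objective: alternative
-- what changed: B computes the result by recursive divide-and-conquer (split the list in halves, add the values of the halves, singleton base case) instead of A's single linear loop with a running +1/-1 accumulator.
import Mathlib
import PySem

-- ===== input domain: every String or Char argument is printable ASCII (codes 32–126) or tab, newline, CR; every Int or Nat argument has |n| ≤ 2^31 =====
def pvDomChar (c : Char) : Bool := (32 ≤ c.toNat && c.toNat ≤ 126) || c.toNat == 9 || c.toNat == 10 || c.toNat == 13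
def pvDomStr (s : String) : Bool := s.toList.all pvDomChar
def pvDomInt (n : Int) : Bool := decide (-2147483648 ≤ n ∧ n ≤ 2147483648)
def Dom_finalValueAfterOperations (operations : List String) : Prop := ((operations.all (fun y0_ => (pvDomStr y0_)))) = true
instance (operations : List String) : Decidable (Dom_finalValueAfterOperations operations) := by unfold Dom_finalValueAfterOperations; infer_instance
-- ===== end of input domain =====

-- B replaces A's linear loop with a running +1/-1 accumulator by recursive divide-and-conquer:
-- split the list in halves, add the values of the halves (objective: alternative, same cost).
-- ===== PORT A =====
def finalValueAfterOperations (operations : List String) : Int :=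
  operations.foldl (fun count num => if PySem.Str.isIn "--" num then count - 1 else count + 1) 0

-- ===== PORT B =====
-- operations[:mid] / operations[mid:] with 0 ≤ mid ≤ len are exactly List.take mid / List.drop mid;
-- len(operations)//2 on a nonnegative Nat is Nat division, identical to Python floor division here
def finalValueAfterOperations_alt (operations : List String) : Int :=
  match operations with
  | [] => 0
  | [x] => if PySem.Str.isIn "--" x then -1 else 1
  | a :: b :: t =>
    let mid := (a :: b :: t).length / 2
    finalValueAfterOperations_alt ((a :: b :: t).take mid) +
      finalValueAfterOperations_alt ((a :: b :: t).drop mid)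
termination_by operations.length
decreasing_by
  · simp only [List.length_take, List.length_cons]; omega
  · simp only [List.length_drop, List.length_cons]; omega

-- ===== PRECONDITION & SPEC =====
def Spec_finalValueAfterOperations (operations : List String) (out : Int) : Prop := out = finalValueAfterOperations_alt operations
instance (operations : List String) (out : Int) : Decidable (Spec_finalValueAfterOperations operations out) := by unfold Spec_finalValueAfterOperations; infer_instance

-- ===== CLAIM (what is proved, stated in full; the proofs are below) =====
def Claim_equal_finalValueAfterOperations : Prop := ∀ (operations : List String), Dom_finalValueAfterOperations operations → Spec_finalValueAfterOperations operations (finalValueAfterOperations operations)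

-- ===== LEMMAS AND PROOFS =====
def pvVal (s : String) : Int := if PySem.Str.isIn "--" s then -1 else 1

theorem pv_alt_eq_sum (operations : List String) :
    finalValueAfterOperations_alt operations = (operations.map pvVal).sum := by
  induction operations using finalValueAfterOperations_alt.induct with
  | case1 => simp [finalValueAfterOperations_alt]
  | case2 x hx => simp [finalValueAfterOperations_alt, pvVal]
  | case3 x hx => simp [finalValueAfterOperations_alt, pvVal]
  | case4 a b t mid ihTake ihDrop =>
    rw [finalValueAfterOperations_alt, ihTake, ihDrop, ← List.sum_append, ← List.map_append,
      List.take_append_drop]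

theorem pv_fold_eq_sum (operations : List String) (c : Int) :
    operations.foldl (fun count num => if PySem.Str.isIn "--" num then count - 1 else count + 1) c
      = c + (operations.map pvVal).sum := by
  induction operations generalizing c with
  | nil => simp
  | cons h t ih =>
    rw [List.foldl_cons, List.map_cons, List.sum_cons]
    by_cases hc : PySem.Str.isIn "--" h
    · rw [if_pos hc, ih]; unfold pvVal; rw [if_pos hc]; ring
    · rw [if_neg hc, ih]; unfold pvVal; rw [if_neg hc]; ring

-- ===== VERDICT (by name: the statement is the Claim_ definition above) =====
theorem finalValueAfterOperations_spec : Claim_equal_finalValueAfterOperations := by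
  intro operations _
  unfold Spec_finalValueAfterOperations finalValueAfterOperations
  rw [pv_alt_eq_sum, pv_fold_eq_sum]; ring
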